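-- pv_equiv track=rewrite | github.com/maxnelso/algorithms_competitions | top_coder/SRM 553/PlatypusDuckAndBeaver.py | minimumAnimals
-- ===== SOURCE A (Python) =====
-- def minimumAnimals(webbedFeet, duckBills, beaverTails):
--   for i in range(beaverTails + 1): # Beavers
--     beavers = i
--     platypus = beaverTails - i
--     ducks = duckBills - platypus
--     if ducks < 0:
--       continue
--     if beavers * 4 + ducks * 2 + platypus * 4 == webbedFeet and \
--        beavers + platypus == beaverTails and \
--        platypus + ducks == duckBills:
--       return beavers + platypus + ducks
--   return 0
-- ===== SOURCE B (Python) =====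
-- def minimumAnimals(webbedFeet, duckBills, beaverTails):
--     # Closed form: the loop's equation 4*i + 2*ducks + 4*platypus == webbedFeet
--     # reduces to 2*(i + duckBills + beaverTails) == webbedFeet, so the only
--     # candidate beaver count is i = webbedFeet//2 - duckBills - beaverTails.
--     if webbedFeet % 2 != 0:
--         return 0
--     beavers = webbedFeet // 2 - duckBills - beaverTails
--     if 0 <= beavers <= beaverTails and duckBills - beaverTails + beavers >= 0:
--         return duckBills + beavers
--     return 0
-- ===== Notes on version B (the rewrite author's own statement) =====
-- stated objective: faster
-- what changed: Replaces the loop over all candidate beaver counts with solving the linear equation 2*(i + duckBills + beaverTails) == webbedFeet in closed form and validating the bounds.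
import Mathlib
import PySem

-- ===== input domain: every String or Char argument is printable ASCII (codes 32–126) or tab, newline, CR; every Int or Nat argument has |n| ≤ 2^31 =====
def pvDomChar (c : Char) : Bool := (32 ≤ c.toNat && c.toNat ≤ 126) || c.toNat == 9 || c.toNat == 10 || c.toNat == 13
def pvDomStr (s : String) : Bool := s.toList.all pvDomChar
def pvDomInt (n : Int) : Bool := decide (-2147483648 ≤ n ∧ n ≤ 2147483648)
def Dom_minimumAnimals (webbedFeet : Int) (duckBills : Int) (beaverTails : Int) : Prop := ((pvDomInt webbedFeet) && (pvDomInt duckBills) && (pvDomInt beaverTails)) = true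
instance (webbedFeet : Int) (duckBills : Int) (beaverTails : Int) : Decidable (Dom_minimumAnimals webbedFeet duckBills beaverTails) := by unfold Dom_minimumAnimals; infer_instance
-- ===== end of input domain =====

-- B replaces A's loop over candidate beaver counts by solving the linear equation in closed form (O(1) vs O(beaverTails)).

-- ===== PORT A =====
-- the for-loop with early return: recursion over the range list
def minimumAnimalsLoop (webbedFeet : Int) (duckBills : Int) (beaverTails : Int) : List Int → Int
  | [] => 0
  | i :: rest =>
    let beavers := i
    let platypus := beaverTails - i
    let ducks := duckBills - platypus
    if ducks < 0 then minimumAnimalsLoop webbedFeet duckBills beaverTails rest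
    else if beavers * 4 + ducks * 2 + platypus * 4 = webbedFeet ∧
            beavers + platypus = beaverTails ∧
            platypus + ducks = duckBills then
      beavers + platypus + ducks
    else minimumAnimalsLoop webbedFeet duckBills beaverTails rest

def minimumAnimals (webbedFeet : Int) (duckBills : Int) (beaverTails : Int) : Int :=
  minimumAnimalsLoop webbedFeet duckBills beaverTails (PySem.List.pyRange 0 (beaverTails + 1) 1)

-- ===== PORT B =====
def minimumAnimals_alt (webbedFeet : Int) (duckBills : Int) (beaverTails : Int) : Int :=
  if PySem.Int.mod webbedFeet 2 ≠ 0 then 0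
  else
    let beavers := PySem.Int.floordiv webbedFeet 2 - duckBills - beaverTails
    if 0 ≤ beavers ∧ beavers ≤ beaverTails ∧ duckBills - beaverTails + beavers ≥ 0 then
      duckBills + beavers
    else 0

-- ===== PRECONDITION & SPEC =====
def Spec_minimumAnimals (webbedFeet : Int) (duckBills : Int) (beaverTails : Int) (out : Int) : Prop := out = minimumAnimals_alt webbedFeet duckBills beaverTails
instance (webbedFeet : Int) (duckBills : Int) (beaverTails : Int) (out : Int) : Decidable (Spec_minimumAnimals webbedFeet duckBills beaverTails out) := by unfold Spec_minimumAnimals; infer_instance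

-- ===== CLAIM (what is proved, stated in full; the proofs are below) =====
def Claim_equal_minimumAnimals : Prop := ∀ (webbedFeet : Int) (duckBills : Int) (beaverTails : Int), Dom_minimumAnimals webbedFeet duckBills beaverTails → Spec_minimumAnimals webbedFeet duckBills beaverTails (minimumAnimals webbedFeet duckBills beaverTails)

-- ===== LEMMAS AND PROOFS =====

-- Invariant: on any sublist of range, the loop finds a hit iff the unique candidate
-- i0 = w // 2 - d - t is in the list (with w even and enough duck bills), and returns d + i0.
theorem minimumAnimalsLoop_eq (w d t : Int) (l : List Int) :
    minimumAnimalsLoop w d t l =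
      if PySem.Int.mod w 2 = 0 ∧ (PySem.Int.floordiv w 2 - d - t) ∈ l ∧ d - t + (PySem.Int.floordiv w 2 - d - t) ≥ 0
      then d + (PySem.Int.floordiv w 2 - d - t) else 0 := by
  induction l with
  | nil => simp [minimumAnimalsLoop]
  | cons i rest ih =>
    have hmod : PySem.Int.mod w 2 = w % 2 := PySem.Int.mod_eq_emod_of_pos (by norm_num)
    have hdiv : PySem.Int.floordiv w 2 = w / 2 := PySem.Int.floordiv_eq_ediv_of_pos (by norm_num)
    rw [minimumAnimalsLoop]
    by_cases hd : d - (t - i) < 0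
    · simp only [hd, if_pos, ih]
      rw [hmod, hdiv] at *
      by_cases h1 : w % 2 = 0 ∧ (w / 2 - d - t) ∈ i :: rest ∧ d - t + (w / 2 - d - t) ≥ 0
      · obtain ⟨he, hm, hdu⟩ := h1
        rcases List.mem_cons.mp hm with heq | hmem
        · exfalso; omega
        · rw [if_pos ⟨he, hmem, hdu⟩, if_pos ⟨he, List.mem_cons_of_mem _ hmem, hdu⟩]
      · rw [if_neg, if_neg h1]
        intro ⟨he, hm, hdu⟩
        exact h1 ⟨he, List.mem_cons_of_mem _ hm, hdu⟩
    · simp only [hd, if_false]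
      by_cases hc : i * 4 + (d - (t - i)) * 2 + (t - i) * 4 = w ∧ i + (t - i) = t ∧ (t - i) + (d - (t - i)) = d
      · rw [if_pos hc]
        -- the hit: i must equal i0, w is even, ducks ≥ 0
        obtain ⟨heq, -, -⟩ := hc
        rw [hmod, hdiv]
        have hi : i = w / 2 - d - t := by omega
        have hev : w % 2 = 0 := by omega
        rw [if_pos ⟨hev, by rw [← hi]; exact List.mem_cons_self, by omega⟩]
        omega
      · rw [if_neg hc, ih, hmod, hdiv]
        by_cases h1 : w % 2 = 0 ∧ (w / 2 - d - t) ∈ i :: rest ∧ d - t + (w / 2 - d - t) ≥ 0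
        · obtain ⟨he, hm, hdu⟩ := h1
          rcases List.mem_cons.mp hm with heq | hmem
          · exfalso; apply hc; omega
          · rw [if_pos ⟨he, hmem, hdu⟩, if_pos ⟨he, List.mem_cons_of_mem _ hmem, hdu⟩]
        · rw [if_neg, if_neg h1]
          intro ⟨he, hm, hdu⟩
          exact h1 ⟨he, List.mem_cons_of_mem _ hm, hdu⟩

-- ===== VERDICT (by name: the statement is the Claim_ definition above) =====
theorem minimumAnimals_spec : Claim_equal_minimumAnimals := by
  intro w d t _
  unfold Spec_minimumAnimals minimumAnimals minimumAnimals_alt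
  rw [minimumAnimalsLoop_eq]
  rw [PySem.Int.mod_eq_emod_of_pos (a := w) (by norm_num : (0:Int) < 2),
      PySem.Int.floordiv_eq_ediv_of_pos (a := w) (by norm_num : (0:Int) < 2)]
  simp only [PySem.List.mem_pyRange_one]
  by_cases he : w % 2 = 0
  · rw [if_neg (by simp [he] : ¬ w % 2 ≠ 0)]
    have hiff : (w % 2 = 0 ∧ (0 ≤ w / 2 - d - t ∧ w / 2 - d - t < t + 1) ∧ d - t + (w / 2 - d - t) ≥ 0)
        ↔ (0 ≤ w / 2 - d - t ∧ w / 2 - d - t ≤ t ∧ d - t + (w / 2 - d - t) ≥ 0) := by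
      constructor <;> intro h <;> exact ⟨by omega, by omega, by omega⟩
    rw [if_congr hiff rfl rfl]
  · rw [if_pos he, if_neg (by tauto)]
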